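-- pv_equiv track=rewrite | github.com/mrkajetanp/programming-exercises | HackerRank/Interview/Citadel/matrix_summation.py | matrix_summation
-- ===== SOURCE A (Python) =====
-- def matrix_summation(arr):
--     def before_sum(array, x, y):
--         result = 0
--         for i in range(x+1):
--             for j in range(y+1):
--                 result += array[i][j]
--         return result - array[x][y]
--
--     for i in range(len(arr)):
--         for j in range(len(arr[0])):
--             if i == 0 and j == 0:
--                 continue
--             arr[i][j] -= before_sum(arr, i, j)
--
--     return arr
-- ===== SOURCE B (Python) =====
-- def matrix_summation(arr):
--     # Closed form: the prefix-sum of the final matrix equals the original matrix,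
--     # so each final cell is the 2D finite difference of the original values.
--     if not arr:
--         return arr
--     m = len(arr[0])
--     orig = [row[:m] for row in arr]
--
--     def cell(i, j):
--         v = orig[i][j]
--         if i:
--             v -= orig[i - 1][j]
--         if j:
--             v -= orig[i][j - 1]
--         if i and j:
--             v += orig[i - 1][j - 1]
--         return v
--
--     for i, row in enumerate(arr):
--         row[:m] = [cell(i, j) for j in range(m)]
--     return arr
-- ===== Notes on version B (the rewrite author's own statement) =====
-- stated objective: faster
-- what changed: A recomputes a full prefix-rectangle sum for every cell (O(n^2 m^2)); B uses the closed form that the running prefix-sum of the final matrix equals the original matrix, so each output cell is the 2D finite difference of at most four original values, computed in one pass.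
import Mathlib
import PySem

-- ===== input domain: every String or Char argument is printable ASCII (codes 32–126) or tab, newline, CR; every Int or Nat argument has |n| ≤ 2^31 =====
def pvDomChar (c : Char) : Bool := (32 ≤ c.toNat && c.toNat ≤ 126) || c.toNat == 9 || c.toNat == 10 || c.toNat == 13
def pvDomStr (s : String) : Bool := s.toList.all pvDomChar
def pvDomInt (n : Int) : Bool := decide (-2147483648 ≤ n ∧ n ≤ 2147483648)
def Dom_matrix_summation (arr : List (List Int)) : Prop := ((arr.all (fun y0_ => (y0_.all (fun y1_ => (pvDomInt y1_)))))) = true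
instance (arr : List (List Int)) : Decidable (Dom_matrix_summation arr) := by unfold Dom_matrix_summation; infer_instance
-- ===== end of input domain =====

-- B replaces A's per-cell prefix-rectangle re-summation by the closed form
-- (each output cell is a 2D finite difference of the original values);
-- both Pythons update arr in place and return it, so the side effect is the same.

-- ===== PORT A =====
def before_sum (array : List (List Int)) (x y : Int) : Int :=
  ((PySem.List.pyRange 0 (x + 1)).foldl (fun result i =>
      (PySem.List.pyRange 0 (y + 1)).foldl (fun result j =>
          result + PySem.List.pyGetD (PySem.List.pyGetD array i []) j 0) result) 0)
  - PySem.List.pyGetD (PySem.List.pyGetD array x []) y 0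

def matrix_summation (arr : List (List Int)) : List (List Int) :=
  (PySem.List.pyRange 0 (arr.length : Int)).foldl (fun a i =>
    (PySem.List.pyRange 0 ((PySem.List.pyGetD a 0 ([] : List Int)).length : Int)).foldl (fun a j =>
      if i = 0 ∧ j = 0 then a
      else
        PySem.List.pySetD a i
          (PySem.List.pySetD (PySem.List.pyGetD a i []) j
            (PySem.List.pyGetD (PySem.List.pyGetD a i []) j 0 - before_sum a i j))) a) arr

-- ===== PORT B =====
def matrix_summation_alt (arr : List (List Int)) : List (List Int) :=
  if arr = [] then arr else
  let m : Nat := (arr.headD []).length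
  let orig : List (List Int) := arr.map (fun row => PySem.List.slice row none (some (m : Int)))
  let o : Int → Int → Int := fun i j => PySem.List.pyGetD (PySem.List.pyGetD orig i []) j 0
  let cell : Int → Int → Int := fun i j =>
    o i j - (if i ≠ 0 then o (i - 1) j else 0) - (if j ≠ 0 then o i (j - 1) else 0)
      + (if i ≠ 0 ∧ j ≠ 0 then o (i - 1) (j - 1) else 0)
  (PySem.List.enumerate arr).map (fun p =>
     (PySem.List.pyRange 0 (m : Int)).map (fun j => cell p.1 j)
       ++ PySem.List.slice p.2 (some (m : Int)) none)

-- ===== PRECONDITION & SPEC =====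
-- Pre_ excludes exactly the inputs on which the Python A raises (IndexError):
-- matrices with some row shorter than row 0.
def Pre_matrix_summation (arr : List (List Int)) : Prop :=
  ∀ row ∈ arr, (arr.headD []).length ≤ row.length
instance (arr : List (List Int)) : Decidable (Pre_matrix_summation arr) := by
  unfold Pre_matrix_summation; infer_instance

def pvWitness_matrix_summation : List (List Int) := [[1, 2], [3, 4], [5, 6]]

def Spec_matrix_summation (arr : List (List Int)) (out : List (List Int)) : Prop :=
  out = matrix_summation_alt arr
instance (arr : List (List Int)) (out : List (List Int)) : Decidable (Spec_matrix_summation arr out) := by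
  unfold Spec_matrix_summation; infer_instance

-- ===== CLAIM (what is proved, stated in full; the proofs are below) =====
def Claim_equal_matrix_summation : Prop :=
  ∀ (arr : List (List Int)), Dom_matrix_summation arr → Pre_matrix_summation arr →
    Spec_matrix_summation arr (matrix_summation arr)

-- ===== LEMMAS AND PROOFS =====

/-- Original value at (i, j) (0 outside). -/
def oV (arr : List (List Int)) (i j : Nat) : Int := (arr.getD i []).getD j 0

/-- The closed-form final value at (i, j): 2D finite difference of `oV`. -/
def fV (arr : List (List Int)) (i j : Nat) : Int :=
  oV arr i j - (if i = 0 then 0 else oV arr (i - 1) j)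
    - (if j = 0 then 0 else oV arr i (j - 1))
    + (if i = 0 ∨ j = 0 then 0 else oV arr (i - 1) (j - 1))

/-- Matrix state after the first `k` cells (row-major, width `m`) have been updated. -/
def mixRow (arr : List (List Int)) (m k i : Nat) : List Int :=
  (List.range ((arr.getD i []).length)).map
    (fun j => if j < m ∧ i * m + j < k then fV arr i j else oV arr i j)

def mix (arr : List (List Int)) (k : Nat) : List (List Int) :=
  (List.range arr.length).map (fun i => mixRow arr ((arr.headD []).length) k i)

/-- Clean Nat-level double prefix sum of the current state. -/
def bsN (a : List (List Int)) (i j : Nat) : Int :=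
  ((List.range (i + 1)).map (fun p => ((List.range (j + 1)).map (fun q => oV a p q)).sum)).sum
    - oV a i j

/-- Clean Nat-level single-cell update of A's loop body. -/
def stepN (a : List (List Int)) (i j : Nat) : List (List Int) :=
  if i = 0 ∧ j = 0 then a
  else a.set i ((a.getD i []).set j ((a.getD i []).getD j 0 - bsN a i j))

lemma before_sum_natCast (a : List (List Int)) (i j : Nat) :
    before_sum a (i : Int) (j : Int) = bsN a i j := by
  unfold before_sum bsN oV
  have h1 : (i:Int) + 1 = ((i+1 : Nat) : Int) := by push_cast; ring
  have h2 : (j:Int) + 1 = ((j+1 : Nat) : Int) := by push_cast; ring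
  rw [h1, h2]
  simp only [PySem.List.pyRange_zero_nat, List.foldl_map]
  have hinner : ∀ (p : Nat) (acc : Int),
      (List.range (j+1)).foldl
        (fun result q => result + PySem.List.pyGetD (PySem.List.pyGetD a ((p:Nat) : Int) []) ((q:Nat):Int) 0) acc
      = acc + ((List.range (j+1)).map (fun q => (a.getD p []).getD q 0)).sum := by
    intro p acc
    simp only [PySem.List.pyGetD_natCast]
    rw [PySem.List.foldl_add]
  simp only [hinner]
  rw [PySem.List.foldl_add]
  simp

lemma body_eq (a : List (List Int)) (i j : Nat) :
    (if (i:Int) = 0 ∧ (j:Int) = 0 then a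
     else
       PySem.List.pySetD a (i:Int)
         (PySem.List.pySetD (PySem.List.pyGetD a (i:Int) []) (j:Int)
           (PySem.List.pyGetD (PySem.List.pyGetD a (i:Int) []) (j:Int) 0 - before_sum a (i:Int) (j:Int))))
    = stepN a i j := by
  simp [stepN, before_sum_natCast]

lemma matrix_summation_eq_natFold (arr : List (List Int)) :
    matrix_summation arr =
      (List.range arr.length).foldl
        (fun a i => (List.range ((a.getD 0 []).length)).foldl (fun a j => stepN a i j) a) arr := by
  unfold matrix_summation
  simp only [PySem.List.pyRange_zero_nat, List.foldl_map, PySem.List.pyGetD_zero, body_eq]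

-- telescoping:  Σ_{q ≤ j} (f q - [q ≠ 0] f (q-1)) = f j
lemma tele_sum (f : Nat → Int) (j : Nat) :
    ((List.range (j + 1)).map (fun q => f q - if q = 0 then 0 else f (q - 1))).sum = f j := by
  induction j with
  | zero => simp
  | succ j ih => rw [List.range_succ, List.map_append, List.sum_append, ih]; simp

lemma sum_map_sub (l : List Nat) (f g : Nat → Int) :
    (l.map (fun x => f x - g x)).sum = (l.map f).sum - (l.map g).sum := by
  induction l with
  | nil => simp
  | cons x t ih => simp [ih]; ring

/-- Double prefix sum of the closed-form values gives back the original value. -/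
lemma sum_fV (arr : List (List Int)) (i j : Nat) :
    ((List.range (i + 1)).map (fun p => ((List.range (j + 1)).map (fun q => fV arr p q)).sum)).sum
      = oV arr i j := by
  have hrow : ∀ p, ((List.range (j+1)).map (fun q => fV arr p q)).sum
      = oV arr p j - if p = 0 then 0 else oV arr (p-1) j := by
    intro p
    by_cases hp : p = 0
    · subst hp
      have h0 : ∀ q, fV arr 0 q = oV arr 0 q - if q = 0 then 0 else oV arr 0 (q-1) := by
        intro q; unfold fV; split_ifs <;> simp_all
      simp only [h0]
      rw [tele_sum (fun q => oV arr 0 q) j]; simp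
    · have h1 : ∀ q, fV arr p q =
          (oV arr p q - if q = 0 then 0 else oV arr p (q-1))
          - (oV arr (p-1) q - if q = 0 then 0 else oV arr (p-1) (q-1)) := by
        intro q; unfold fV; split_ifs <;> simp_all <;> ring
      simp only [h1]
      rw [sum_map_sub, tele_sum (fun q => oV arr p q) j, tele_sum (fun q => oV arr (p-1) q) j]
      simp [hp]
  simp only [hrow]
  exact tele_sum (fun p => oV arr p j) i

lemma idx_lt_iff (m p q i j : Nat) (hq : q < m) (hj : j < m) :
    p * m + q < i * m + j ↔ (p < i ∨ (p = i ∧ q < j)) := by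
  constructor
  · intro h
    rcases lt_trichotomy p i with hpi|hpi|hpi
    · exact Or.inl hpi
    · exact Or.inr ⟨hpi, by subst hpi; omega⟩
    · exfalso
      have h2 : (i+1) * m ≤ p * m := Nat.mul_le_mul_right m (by omega)
      rw [Nat.succ_mul] at h2
      omega
  · rintro (hpi | ⟨hpi, hqj⟩)
    · have h2 : (p+1) * m ≤ i * m := Nat.mul_le_mul_right m hpi
      rw [Nat.succ_mul] at h2
      omega
    · subst hpi; omega

lemma idx_eq_iff (m p q i j : Nat) (hq : q < m) (hj : j < m) :
    p * m + q = i * m + j ↔ (p = i ∧ q = j) := by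
  constructor
  · intro h
    have h1 := (idx_lt_iff m p q i j hq hj).not.mp (by omega)
    have h2 := (idx_lt_iff m i j p q hj hq).not.mp (by omega)
    push Not at h1 h2
    omega
  · rintro ⟨hp, hq⟩; subst hp; subst hq; rfl

lemma map_getD_range {α : Type} (xs : List α) (d : α) :
    (List.range xs.length).map (fun i => xs.getD i d) = xs := by
  apply List.ext_getElem
  · simp
  · intro i h1 h2
    simp [List.getElem?_eq_getElem h2]

lemma map_getD_drop (l : List Int) (m : Nat) (hm : m ≤ l.length) :
    (List.range (l.length - m)).map (fun k => l.getD (m + k) 0) = l.drop m := by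
  apply List.ext_getElem
  · simp
  · intro i h1 h2
    simp at h1
    simp [List.getElem?_eq_getElem (by omega : m + i < l.length)]

lemma fV_zero (arr : List (List Int)) : fV arr 0 0 = oV arr 0 0 := by
  simp [fV]

lemma mixRow_zero (arr : List (List Int)) (m i : Nat) : mixRow arr m 0 i = arr.getD i [] := by
  unfold mixRow
  simp only [Nat.not_lt_zero, and_false, if_false]
  exact map_getD_range _ 0

lemma mix_zero (arr : List (List Int)) : mix arr 0 = arr := by
  unfold mix
  simp only [mixRow_zero]
  exact map_getD_range arr []

lemma cellStep (arr : List (List Int)) (hP : Pre_matrix_summation arr)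
    (hne : arr ≠ []) (i j : Nat) (hi : i < arr.length) (hj : j < (arr.headD []).length) :
    stepN (mix arr (i * ((arr.headD []).length) + j)) i j
      = mix arr (i * ((arr.headD []).length) + j + 1) := by
  have hrows : ∀ row ∈ arr, (arr.headD []).length ≤ row.length := hP
  set m := (arr.headD []).length with hmdef
  set n := arr.length with hndef
  set k := i * m + j with hkdef
  have hmle : ∀ p, p < n → m ≤ (arr.getD p []).length := by
    intro p hp
    refine hrows _ ?_
    rw [List.getD_eq_getElem _ _ hp]
    exact List.getElem_mem hp
  have hgetmix : ∀ (k' p : Nat), p < n → (mix arr k').getD p [] = mixRow arr m k' p := by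
    intro k' p hp
    unfold mix
    exact PySem.List.getD_map_range _ _ _ _ hp
  have hentry : ∀ (k' p q : Nat), p < n → q < (arr.getD p []).length →
      ((mix arr k').getD p []).getD q 0
        = if q < m ∧ p * m + q < k' then fV arr p q else oV arr p q := by
    intro k' p q hp hq
    rw [hgetmix k' p hp]
    unfold mixRow
    try simp only [← hmdef]
    exact PySem.List.getD_map_range _ _ _ _ hq
  by_cases h00 : i = 0 ∧ j = 0
  · obtain ⟨hi0, hj0⟩ := h00
    subst hi0; subst hj0
    unfold stepN
    rw [if_pos ⟨rfl, rfl⟩]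
    unfold mix
    apply List.map_congr_left
    intro p hp
    unfold mixRow
    try simp only [← hmdef]
    apply List.map_congr_left
    intro q hq
    split_ifs with h1 h2
    · rfl
    · omega
    · have hp0 : p = 0 := by
        by_contra hpne
        have : 1 * m ≤ p * m := Nat.mul_le_mul_right m (by omega)
        omega
      have hq0 : q = 0 := by omega
      subst hp0; subst hq0; exact (fV_zero arr).symm
    · rfl
  · unfold stepN
    rw [if_neg h00]
    have hjlen : j < (arr.getD i []).length := lt_of_lt_of_le hj (hmle i hi)
    have hcur : ((mix arr k).getD i []).getD j 0 = oV arr i j := by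
      rw [hentry k i j hi hjlen, if_neg (by omega)]
    have hsumrow_lt : ∀ p, p < i →
        ((List.range (j+1)).map (fun q => oV (mix arr k) p q)).sum
          = ((List.range (j+1)).map (fun q => fV arr p q)).sum := by
      intro p hp
      congr 1
      apply List.map_congr_left
      intro q hq
      simp only [List.mem_range] at hq
      show oV (mix arr k) p q = fV arr p q
      unfold oV
      rw [hentry k p q (by omega) (by have := hmle p (by omega); omega)]
      rw [if_pos ⟨by omega, (idx_lt_iff m p q i j (by omega) hj).mpr (Or.inl hp)⟩]
    have hrow_i_q : ∀ q, q < j → oV (mix arr k) i q = fV arr i q := by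
      intro q hq
      unfold oV
      rw [hentry k i q hi (by have := hmle i hi; omega)]
      rw [if_pos ⟨by omega, (idx_lt_iff m i q i j (by omega) hj).mpr (Or.inr ⟨rfl, hq⟩)⟩]
    have hsumrow_i : ((List.range (j+1)).map (fun q => oV (mix arr k) i q)).sum
        = ((List.range (j+1)).map (fun q => fV arr i q)).sum - fV arr i j + oV arr i j := by
      rw [List.range_succ (n := j), List.map_append, List.map_append, List.sum_append, List.sum_append]
      have e1 : (List.range j).map (fun q => oV (mix arr k) i q)
          = (List.range j).map (fun q => fV arr i q) :=
        List.map_congr_left (fun q hq => hrow_i_q q (List.mem_range.mp hq))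
      rw [e1]
      have e2 : oV (mix arr k) i j = oV arr i j := hcur
      simp only [List.map_cons, List.map_nil, List.sum_cons, List.sum_nil, add_zero, e2]
      omega
    have hSF := sum_fV arr i j
    rw [List.range_succ (n := i), List.map_append, List.sum_append] at hSF
    have hbs : bsN (mix arr k) i j = oV arr i j - fV arr i j := by
      unfold bsN
      rw [List.range_succ (n := i), List.map_append, List.sum_append]
      have e3 : (List.range i).map (fun p => ((List.range (j+1)).map (fun q => oV (mix arr k) p q)).sum)
          = (List.range i).map (fun p => ((List.range (j+1)).map (fun q => fV arr p q)).sum) :=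
        List.map_congr_left (fun p hp => hsumrow_lt p (List.mem_range.mp hp))
      rw [e3]
      simp only [List.map_cons, List.map_nil, List.sum_cons, List.sum_nil, add_zero] at hSF ⊢
      rw [hsumrow_i]
      have e4 : oV (mix arr k) i j = oV arr i j := hcur
      rw [e4]
      omega
    rw [hcur, hbs]
    have hval : oV arr i j - (oV arr i j - fV arr i j) = fV arr i j := by ring
    rw [hval, hgetmix k i hi]
    apply List.ext_getElem
    · simp [mix]
    · intro p h1 h2
      have hpn : p < n := by simpa [mix] using h2
      have hmixget : ∀ k' (hk' : p < (mix arr k').length), (mix arr k')[p]'hk' = mixRow arr m k' p := by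
        intro k' hk'
        simp [mix, hmdef]
      rw [List.getElem_set]
      by_cases hpi : i = p
      · subst hpi
        rw [if_pos rfl, hmixget]
        apply List.ext_getElem
        · simp [mixRow]
        · intro q hq1 hq2
          have hqlen : q < (arr.getD i []).length := by simpa [mixRow] using hq2
          rw [List.getElem_set]
          by_cases hqj : j = q
          · subst hqj
            rw [if_pos rfl]
            simp only [mixRow, List.getElem_map, List.getElem_range]
            try simp only [← hmdef]
            rw [if_pos ⟨hj, by omega⟩]
          · rw [if_neg hqj]
            simp only [mixRow, List.getElem_map, List.getElem_range]
            try simp only [← hmdef]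
            by_cases hqm : q < m
            · have hne' : ¬ (i * m + q = i * m + j) := by
                have hjq : j ≠ q := hqj
                omega
              by_cases hlt : i * m + q < k
              · rw [if_pos ⟨hqm, hlt⟩, if_pos ⟨hqm, by omega⟩]
              · rw [if_neg (by omega), if_neg (by omega)]
            · rw [if_neg (by omega), if_neg (by omega)]
      · rw [if_neg hpi, hmixget, hmixget]
        unfold mixRow
        try simp only [← hmdef]
        apply List.map_congr_left
        intro q hq
        by_cases hqm : q < m
        · have hne' : p * m + q ≠ i * m + j := by
            intro hcon
            exact hpi ((idx_eq_iff m p q i j hqm hj).mp hcon).1.symm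
          by_cases hlt : p * m + q < k
          · rw [if_pos ⟨hqm, hlt⟩, if_pos ⟨hqm, by omega⟩]
          · rw [if_neg (by omega), if_neg (by omega)]
        · rw [if_neg (by omega), if_neg (by omega)]

lemma mainFold (arr : List (List Int)) (hne : arr ≠ []) (hP : Pre_matrix_summation arr) :
    (List.range arr.length).foldl
        (fun a i => (List.range ((a.getD 0 []).length)).foldl (fun a j => stepN a i j) a) arr
      = mix arr (arr.length * ((arr.headD []).length)) := by
  have hrows : ∀ row ∈ arr, (arr.headD []).length ≤ row.length := hP
  set m := (arr.headD []).length with hmdef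
  set n := arr.length with hndef
  have hn0 : 0 < n := by
    cases arr with
    | nil => exact absurd rfl hne
    | cons h t => simp [hndef]
  have hhead : arr.getD 0 [] = arr.headD [] := by
    cases arr with
    | nil => rfl
    | cons h t => rfl
  have hlenmix : ∀ k, ((mix arr k).getD 0 []).length = m := by
    intro k
    have hg : (mix arr k).getD 0 [] = mixRow arr m k 0 := by
      unfold mix
      exact PySem.List.getD_map_range _ _ _ _ hn0
    rw [hg]
    have hl : (mixRow arr m k 0).length = (arr.getD 0 []).length := by simp [mixRow]
    rw [hl, hhead]
  have hrow : ∀ i, i < n → ∀ jj, jj ≤ m →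
      (List.range jj).foldl (fun a j => stepN a i j) (mix arr (i * m)) = mix arr (i * m + jj) := by
    intro i hi jj
    induction jj with
    | zero => intro _; simp
    | succ jj ih =>
      intro hjj
      rw [List.range_succ, List.foldl_append, ih (by omega)]
      have hc := cellStep arr hrows hne i jj hi (by omega)
      rw [← hmdef] at hc
      exact hc
  have houter : ∀ ii, ii ≤ n →
      (List.range ii).foldl
          (fun a i => (List.range ((a.getD 0 []).length)).foldl (fun a j => stepN a i j) a) arr
        = mix arr (ii * m) := by
    intro ii
    induction ii with
    | zero => intro _; simp [mix_zero]
    | succ ii ih =>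
      intro hii
      rw [List.range_succ, List.foldl_append, ih (by omega)]
      simp only [List.foldl_cons, List.foldl_nil]
      rw [hlenmix (ii * m), hrow ii (by omega) m (le_refl m), Nat.succ_mul]
  exact houter n (le_refl n)

lemma getD_map_lt {α β : Type} (f : α → β) (xs : List α) (p : Nat) (d : α) (d' : β)
    (h : p < xs.length) : (xs.map f).getD p d' = f (xs.getD p d) := by
  rw [List.getD_eq_getElem _ _ (by simpa using h), List.getD_eq_getElem _ _ h, List.getElem_map]

lemma alt_eq_mix (arr : List (List Int)) (hne : arr ≠ []) (hP : Pre_matrix_summation arr) :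
    matrix_summation_alt arr = mix arr (arr.length * ((arr.headD []).length)) := by
  have hrows : ∀ row ∈ arr, (arr.headD []).length ≤ row.length := hP
  set m := (arr.headD []).length with hmdef
  set n := arr.length with hndef
  have hmle : ∀ p, p < n → m ≤ (arr.getD p []).length := by
    intro p hp
    refine hrows _ ?_
    rw [List.getD_eq_getElem _ _ hp]
    exact List.getElem_mem hp
  have ho : ∀ p q : Nat, p < n → q < m →
      ((arr.map (fun row => PySem.List.slice row none (some (m : Int)))).getD p []).getD q 0
        = oV arr p q := by
    intro p q hp hq
    rw [getD_map_lt _ _ _ [] _ hp]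
    rw [PySem.List.slice_to_natCast]
    have hlen : q < ((arr.getD p []).take m).length := by
      rw [List.length_take]
      have := hmle p hp
      omega
    rw [List.getD_eq_getElem _ _ hlen]
    have hq2 : q < (arr.getD p []).length := by have := hmle p hp; omega
    have hrhs : oV arr p q = (arr.getD p [])[q]'hq2 := by
      unfold oV
      rw [List.getD_eq_getElem _ _ hq2]
    rw [hrhs]
    simp [List.getElem_take]
  unfold matrix_summation_alt
  rw [if_neg hne, PySem.List.enumerate_eq_map_pyRange arr []]
  simp only [PySem.List.len_eq, ← hndef, ← hmdef, PySem.List.pyRange_zero_nat, List.map_map]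
  unfold mix
  apply List.map_congr_left
  intro i hi
  simp only [List.mem_range] at hi
  simp only [Function.comp_apply, PySem.List.pyGetD_natCast]
  rw [PySem.List.slice_from_natCast]
  unfold mixRow
  try simp only [← hmdef]
  have hsplit : (arr.getD i []).length = m + ((arr.getD i []).length - m) := by
    have := hmle i hi
    omega
  rw [hsplit, List.range_add, List.map_append, List.map_map]
  congr 1
  · -- first m columns
    apply List.map_congr_left
    intro q hq
    simp only [List.mem_range] at hq
    simp only [Function.comp_apply]
    have hcond : q < m ∧ i * m + q < n * m := by
      refine ⟨hq, ?_⟩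
      have h2 : (i + 1) * m ≤ n * m := Nat.mul_le_mul_right m (by omega)
      rw [Nat.succ_mul] at h2
      omega
    rw [if_pos hcond]
    -- cell value = fV
    by_cases hi0 : i = 0
    · by_cases hq0 : q = 0
      · subst hi0; subst hq0
        simp only [Nat.cast_zero, ne_eq, not_true_eq_false, if_false, false_and, ite_false,
          sub_zero, add_zero]
        simp only [PySem.List.pyGetD_zero, PySem.List.pyGetD_natCast]
        rw [ho 0 0 hi hq]
        unfold fV
        simp
      · subst hi0
        have hqc : ((q : Int) ≠ 0) := by
          simp [hq0]
        simp only [Nat.cast_zero, ne_eq, not_true_eq_false, if_false, false_and, ite_false,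
          if_pos hqc, sub_zero, add_zero]
        have e1 : ((q : Int) - 1) = ((q - 1 : Nat) : Int) := by omega
        rw [e1]
        simp only [PySem.List.pyGetD_zero, PySem.List.pyGetD_natCast]
        rw [ho 0 q hi hq, ho 0 (q-1) hi (by omega)]
        unfold fV
        rw [if_pos rfl, if_neg hq0, if_pos (Or.inl rfl)]
        ring
    · have hic : ((i : Int) ≠ 0) := by simp [hi0]
      have e2 : ((i : Int) - 1) = ((i - 1 : Nat) : Int) := by omega
      by_cases hq0 : q = 0
      · subst hq0
        simp only [Nat.cast_zero, ne_eq, not_true_eq_false, and_false, ite_false, if_pos hic,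
          sub_zero]
        rw [e2]
        simp only [PySem.List.pyGetD_zero, PySem.List.pyGetD_natCast]
        rw [ho i 0 hi hq, ho (i-1) 0 (by omega) hq]
        unfold fV
        rw [if_neg hi0, if_pos rfl, if_pos (Or.inr rfl)]
        ring
      · have hqc : ((q : Int) ≠ 0) := by simp [hq0]
        have e1 : ((q : Int) - 1) = ((q - 1 : Nat) : Int) := by omega
        rw [if_pos hic, if_pos hqc, if_pos ⟨hic, hqc⟩, e1, e2]
        simp only [PySem.List.pyGetD_zero, PySem.List.pyGetD_natCast]
        rw [ho i q hi hq, ho (i-1) q (by omega) hq, ho i (q-1) hi (by omega),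
          ho (i-1) (q-1) (by omega) (by omega)]
        unfold fV
        rw [if_neg hi0, if_neg hq0, if_neg (by simp [hi0, hq0])]
  · -- remaining columns: untouched tail
    have hdrop := map_getD_drop (arr.getD i []) m (hmle i hi)
    rw [← hdrop]
    apply List.map_congr_left
    intro q hq
    simp only [List.mem_range] at hq
    simp only [Function.comp_apply]
    rw [if_neg (by omega)]
    unfold oV
    rfl

-- ===== VERDICT (by name: the statement is the Claim_ definition above) =====
theorem matrix_summation_spec : Claim_equal_matrix_summation := by
  intro arr _ hP
  unfold Spec_matrix_summation
  by_cases hne : arr = []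
  · subst hne; rfl
  · rw [matrix_summation_eq_natFold, mainFold arr hne hP, alt_eq_mix arr hne hP]
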